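-- pv_equiv track=rewrite | github.com/AleksSol/kurchatov | main.py | check_eq
-- ===== SOURCE A (Python) =====
-- def check_eq(a,b):
--     cnt=0
--     na=len(a)
--     nb=len(b)
--     if na!=nb:
--         return False
--     for i in range(na):
--         if a[i]!=b[i]:
--             cnt+=1
--     if cnt<=1:
--         return True
--     return False
-- ===== SOURCE B (Python) =====
-- def check_eq(a, b):
--     if len(a) != len(b):
--         return False
--     i = 0
--     n = len(a)
--     while i < n and a[i] == b[i]:
--         i += 1
--     if i == n:
--         return True
--     return a[i+1:] == b[i+1:]
-- ===== Notes on version B (the rewrite author's own statement) =====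
-- stated objective: alternative
-- what changed: Instead of counting every mismatch and comparing the count to 1, B scans for the first mismatching index and, if one exists, decides by comparing the two tails after it for exact equality (short-circuits on the second mismatch).
import Mathlib
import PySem

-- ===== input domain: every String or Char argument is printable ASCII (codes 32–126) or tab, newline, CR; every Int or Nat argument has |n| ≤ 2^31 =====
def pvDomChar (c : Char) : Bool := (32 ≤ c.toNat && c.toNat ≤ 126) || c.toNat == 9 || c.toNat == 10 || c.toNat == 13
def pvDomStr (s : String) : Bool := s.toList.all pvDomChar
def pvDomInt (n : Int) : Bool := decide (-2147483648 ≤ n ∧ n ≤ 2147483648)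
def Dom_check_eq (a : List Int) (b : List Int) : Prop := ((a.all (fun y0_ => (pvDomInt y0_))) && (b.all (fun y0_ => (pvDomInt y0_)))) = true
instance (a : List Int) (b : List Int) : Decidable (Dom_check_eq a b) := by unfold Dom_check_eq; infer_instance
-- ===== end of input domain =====

-- B replaces A's "count every mismatch, then compare the count with 1" by
-- "find the first mismatching index; the answer is whether the two tails after it are equal".

-- ===== PORT A =====
def check_eq (a : List Int) (b : List Int) : Bool :=
  -- cnt = 0; na = len(a); nb = len(b); if na != nb: return False
  if (a.length : Int) ≠ (b.length : Int) then false
  else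
    -- for i in range(na): if a[i] != b[i]: cnt += 1
    if (PySem.List.pyRange 0 (a.length : Int) 1).foldl
        (fun c i => if PySem.List.pyGet? a i ≠ PySem.List.pyGet? b i then c + 1 else c) (0 : Int)
       ≤ 1 then true
    else false

-- ===== PORT B =====
-- the 'while i < n and a[i] == b[i]: i += 1' loop of Source B
def firstDiff (a b : List Int) (i : Nat) : Nat :=
  if _h : i < a.length then
    if PySem.List.pyGet? a (i : Int) = PySem.List.pyGet? b (i : Int) then firstDiff a b (i + 1)
    else i
  else i
termination_by a.length - i

def check_eq_alt (a : List Int) (b : List Int) : Bool :=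
  if a.length ≠ b.length then false
  else
    if firstDiff a b 0 = a.length then true
    else PySem.List.slice a (some ((firstDiff a b 0 + 1 : Nat) : Int)) none
         == PySem.List.slice b (some ((firstDiff a b 0 + 1 : Nat) : Int)) none

-- ===== PRECONDITION & SPEC =====
def Spec_check_eq (a : List Int) (b : List Int) (out : Bool) : Prop := out = check_eq_alt a b
instance (a : List Int) (b : List Int) (out : Bool) : Decidable (Spec_check_eq a b out) := by unfold Spec_check_eq; infer_instance

-- ===== CLAIM (what is proved, stated in full; the proofs are below) =====
def Claim_equal_check_eq : Prop := ∀ (a : List Int) (b : List Int), Dom_check_eq a b → Spec_check_eq a b (check_eq a b)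

-- ===== LEMMAS AND PROOFS =====

-- number of positions where the two lists differ (on their common length)
def mism : List Int → List Int → Nat
  | x :: xs, y :: ys => (if x ≠ y then 1 else 0) + mism xs ys
  | _, _ => 0

-- length of the common prefix of the two lists
def lead : List Int → List Int → Nat
  | x :: xs, y :: ys => if x = y then 1 + lead xs ys else 0
  | _, _ => 0

theorem fold_cnt (a b : List Int) (hlen : a.length = b.length) :
    ∀ k (c : Int), k ≤ a.length →
      (PySem.List.pyRange (k : Int) (a.length : Int) 1).foldl
        (fun c i => if PySem.List.pyGet? a i ≠ PySem.List.pyGet? b i then c + 1 else c) c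
      = c + (mism (a.drop k) (b.drop k) : Int) := by
  intro k c hk
  induction hd : a.length - k generalizing k c with
  | zero =>
    have hke : k = a.length := by omega
    subst hke
    rw [PySem.List.pyRange_one_eq_nil (le_refl _)]
    simp [List.drop_eq_nil_of_le (le_refl a.length),
      List.drop_eq_nil_of_le (le_of_eq hlen.symm), mism]
  | succ m ih =>
    have hklt : k < a.length := by omega
    have hkb : k < b.length := by omega
    rw [PySem.List.pyRange_one_cons (by exact_mod_cast hklt)]
    simp only [List.foldl_cons]
    have ha : PySem.List.pyGet? a (k : Int) = some (a[k]'hklt) := by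
      rw [PySem.List.pyGet?_natCast]; exact List.getElem?_eq_getElem hklt
    have hb : PySem.List.pyGet? b (k : Int) = some (b[k]'hkb) := by
      rw [PySem.List.pyGet?_natCast]; exact List.getElem?_eq_getElem hkb
    have hcast : ((k : Int) + 1) = ((k + 1 : Nat) : Int) := by push_cast; ring
    rw [ha, hb, hcast, ih (k + 1) _ (by omega) (by omega)]
    rw [List.drop_eq_getElem_cons hklt, List.drop_eq_getElem_cons hkb]
    by_cases hxy : a[k]'hklt = b[k]'hkb
    · simp [mism, hxy]
    · simp [mism, hxy]
      ring

theorem firstDiff_eq_lead (a b : List Int) (hlen : a.length = b.length) :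
    ∀ k, k ≤ a.length → firstDiff a b k = k + lead (a.drop k) (b.drop k) := by
  intro k hk
  induction hd : a.length - k generalizing k with
  | zero =>
    have hke : k = a.length := by omega
    subst hke
    rw [firstDiff]
    simp [List.drop_eq_nil_of_le (le_refl a.length),
      List.drop_eq_nil_of_le (le_of_eq hlen.symm), lead]
  | succ m ih =>
    have hklt : k < a.length := by omega
    have hkb : k < b.length := by omega
    have ha : PySem.List.pyGet? a (k : Int) = some (a[k]'hklt) := by
      rw [PySem.List.pyGet?_natCast]; exact List.getElem?_eq_getElem hklt
    have hb : PySem.List.pyGet? b (k : Int) = some (b[k]'hkb) := by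
      rw [PySem.List.pyGet?_natCast]; exact List.getElem?_eq_getElem hkb
    rw [firstDiff, dif_pos hklt, ha, hb]
    rw [List.drop_eq_getElem_cons hklt, List.drop_eq_getElem_cons hkb]
    by_cases hxy : a[k]'hklt = b[k]'hkb
    · rw [if_pos (by rw [hxy]), ih (k + 1) (by omega) (by omega)]
      simp [lead, hxy]
      omega
    · rw [if_neg (by simpa using hxy)]
      simp [lead, hxy]

theorem lead_le (a b : List Int) : lead a b ≤ a.length := by
  induction a generalizing b with
  | nil => simp [lead]
  | cons x xs ih =>
    cases b with
    | nil => simp [lead]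
    | cons y ys =>
      by_cases hxy : x = y <;> simp [lead, hxy]
      have := ih ys
      omega

theorem mism_eq_zero_iff (a b : List Int) (hlen : a.length = b.length) : mism a b = 0 ↔ a = b := by
  induction a generalizing b with
  | nil =>
    cases b with
    | nil => simp [mism]
    | cons y ys => simp at hlen
  | cons x xs ih =>
    cases b with
    | nil => simp at hlen
    | cons y ys =>
      by_cases hxy : x = y <;>
        simp [mism, hxy, ih ys (by simpa using hlen)]

theorem lead_full (a b : List Int) (hlen : a.length = b.length) (h : lead a b = a.length) :
    mism a b = 0 := by
  induction a generalizing b with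
  | nil =>
    cases b with
    | nil => simp [mism]
    | cons y ys => simp at hlen
  | cons x xs ih =>
    cases b with
    | nil => simp at hlen
    | cons y ys =>
      by_cases hxy : x = y
      · simp only [lead, if_pos hxy, List.length_cons] at h
        have h2 : lead xs ys = xs.length := by omega
        simp [mism, hxy, ih ys (by simpa using hlen) h2]
      · simp only [lead, if_neg hxy] at h
        simp at h
  
theorem mism_lead_lt (a b : List Int) (hlen : a.length = b.length) (h : lead a b < a.length) :
    mism a b = 1 + mism (a.drop (lead a b + 1)) (b.drop (lead a b + 1)) := by
  induction a generalizing b with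
  | nil => simp at h
  | cons x xs ih =>
    cases b with
    | nil => simp at hlen
    | cons y ys =>
      by_cases hxy : x = y
      · have hl : lead (x :: xs) (y :: ys) = 1 + lead xs ys := by
          simp [lead, hxy]
        have hlt : lead xs ys < xs.length := by
          rw [hl] at h; simp only [List.length_cons] at h; omega
        have hidx : lead (x :: xs) (y :: ys) + 1 = (lead xs ys + 1) + 1 := by
          rw [hl]; omega
        rw [hidx, List.drop_succ_cons, List.drop_succ_cons]
        have hm : mism (x :: xs) (y :: ys) = mism xs ys := by simp [mism, hxy]
        rw [hm, ih ys (by simpa using hlen) hlt]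
      · have hl : lead (x :: xs) (y :: ys) = 0 := by simp [lead, hxy]
        rw [hl]
        simp only [Nat.zero_add, List.drop_one, List.tail_cons]
        simp [mism, hxy]

theorem check_eq_eq_alt (a b : List Int) : check_eq a b = check_eq_alt a b := by
  unfold check_eq check_eq_alt
  by_cases hlen : a.length = b.length
  · have hnei : ¬ ((a.length : Int) ≠ (b.length : Int)) := by
      simp [hlen]
    have hne2 : ¬ (a.length ≠ b.length) := not_not_intro hlen
    rw [if_neg hnei, if_neg hne2]
    have hfold := fold_cnt a b hlen 0 0 (Nat.zero_le _)
    simp only [Nat.cast_zero] at hfold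
    rw [hfold]
    simp only [List.drop_zero, zero_add]
    have hfd := firstDiff_eq_lead a b hlen 0 (Nat.zero_le _)
    simp only [List.drop_zero, Nat.zero_add] at hfd
    rw [hfd]
    by_cases hfull : lead a b = a.length
    · rw [if_pos hfull, lead_full a b hlen hfull]
      norm_num
    · have hlt : lead a b < a.length := lt_of_le_of_ne (lead_le a b) hfull
      rw [if_neg hfull]
      rw [PySem.List.slice_from_natCast, PySem.List.slice_from_natCast]
      rw [mism_lead_lt a b hlen hlt]
      have hdlen : (a.drop (lead a b + 1)).length = (b.drop (lead a b + 1)).length := by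
        simp [hlen]
      have hiff := mism_eq_zero_iff _ _ hdlen
      by_cases hz : mism (a.drop (lead a b + 1)) (b.drop (lead a b + 1)) = 0
      · rw [hz]
        have hde : a.drop (lead a b + 1) = b.drop (lead a b + 1) := hiff.mp hz
        simp [hde]
      · have hde : a.drop (lead a b + 1) ≠ b.drop (lead a b + 1) := fun h => hz (hiff.mpr h)
        rw [if_neg (by push_cast; omega)]
        simp [hde]
  · have h1 : (a.length : Int) ≠ (b.length : Int) := by exact_mod_cast hlen
    rw [if_pos h1, if_pos hlen]

-- ===== VERDICT (by name: the statement is the Claim_ definition above) =====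
theorem check_eq_spec : Claim_equal_check_eq := by
  intro a b _
  unfold Spec_check_eq
  exact check_eq_eq_alt a b
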